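-- pv_equiv track=rewrite | github.com/pinkllo/autospider | src/autospider/field/xpath_pattern.py | _merge_attributes
-- ===== SOURCE A (Python) =====
-- def _merge_attributes(all_attrs: list[list[str]]) -> list[str]:
--     """
--     合并多个XPath节点的属性选择器
--
--     策略：取所有XPath共有的属性选择器
--     """
--     if not all_attrs:
--         return []
--
--     # 取交集
--     if not all_attrs[0]:
--         return []
--
--     common = set(all_attrs[0])
--     for attrs in all_attrs[1:]:
--         common &= set(attrs)
--
--     return sorted(list(common))
-- ===== SOURCE B (Python) =====
-- def _merge_attributes(all_attrs: list[list[str]]) -> list[str]: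
--     """Frequency-table pass: count in how many lists each attribute occurs
--     (dedup per list), keep those occurring in all of them, sorted."""
--     if not all_attrs:
--         return []
--     n = len(all_attrs)
--     counts = {}
--     for attrs in all_attrs:
--         for k in set(attrs):
--             counts[k] = counts.get(k, 0) + 1
--     return sorted(k for k, c in counts.items() if c == n)
-- ===== Notes on version B (the rewrite author's own statement) =====
-- stated objective: alternative
-- what changed: Replaced the incremental set-intersection fold with a single frequency-count pass over per-list-deduplicated attributes plus a count==len(all_attrs) threshold filter.
import Mathlib
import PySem

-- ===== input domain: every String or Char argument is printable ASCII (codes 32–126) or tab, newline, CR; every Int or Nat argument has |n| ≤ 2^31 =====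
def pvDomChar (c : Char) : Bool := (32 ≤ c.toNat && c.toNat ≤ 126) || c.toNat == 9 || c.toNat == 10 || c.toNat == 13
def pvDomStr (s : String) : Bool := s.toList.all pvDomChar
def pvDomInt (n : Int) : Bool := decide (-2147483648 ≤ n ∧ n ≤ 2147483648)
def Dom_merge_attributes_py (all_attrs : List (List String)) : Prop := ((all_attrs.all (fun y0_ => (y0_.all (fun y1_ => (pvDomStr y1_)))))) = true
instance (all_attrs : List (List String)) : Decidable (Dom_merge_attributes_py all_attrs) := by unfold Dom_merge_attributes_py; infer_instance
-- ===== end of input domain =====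

-- B replaces A's incremental set-intersection fold by one frequency-count pass
-- (count, per-list deduplicated, how many lists contain each attribute) plus a
-- count = len(all_attrs) threshold filter; same results, alternative algorithm.

-- ===== PORT A =====
def merge_attributes_py (all_attrs : List (List String)) : List String :=
  match all_attrs with
  | [] => []
  | a0 :: rest =>
    if a0 = [] then []
    else
      let common :=
        rest.foldl (fun c attrs => PySem.Set.inter c (PySem.Set.ofList attrs))
          (PySem.Set.ofList a0)
      PySem.List.sorted common (fun x => x) false

-- ===== PORT B =====
def merge_attributes_py_alt (all_attrs : List (List String)) : List String :=
  if all_attrs = [] then []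
  else
    let n : Int := all_attrs.length
    let counts : PySem.Dict String Int :=
      all_attrs.foldl
        (fun d attrs =>
          (PySem.Set.ofList attrs).foldl (fun d k => d.insert k (d.getD k 0 + 1)) d)
        PySem.Dict.empty
    PySem.List.sorted
      ((counts.items.filter (fun kv => kv.2 == n)).map (fun kv => kv.1))
      (fun x => x) false

-- ===== PRECONDITION & SPEC =====
def Spec_merge_attributes_py (all_attrs : List (List String)) (out : List String) : Prop := out = merge_attributes_py_alt all_attrs
instance (all_attrs : List (List String)) (out : List String) : Decidable (Spec_merge_attributes_py all_attrs out) := by unfold Spec_merge_attributes_py; infer_instance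

-- ===== CLAIM (what is proved, stated in full; the proofs are below) =====
def Claim_equal_merge_attributes_py : Prop := ∀ (all_attrs : List (List String)), Dom_merge_attributes_py all_attrs → Spec_merge_attributes_py all_attrs (merge_attributes_py all_attrs)

-- ===== LEMMAS AND PROOFS =====

-- the multiset of per-list-deduplicated attributes
def pvL (all_attrs : List (List String)) : List String :=
  all_attrs.flatMap (fun a => PySem.Set.ofList a)

theorem pvL_count (all_attrs : List (List String)) (k : String) :
    (pvL all_attrs).count k = all_attrs.countP (fun a => decide (k ∈ a)) := by
  induction all_attrs with
  | nil => rfl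
  | cons a rest ih =>
    simp only [pvL, List.flatMap_cons, List.count_append, List.countP_cons] at *
    rw [ih, (PySem.Set.nodup_ofList a).count]
    by_cases h : k ∈ a
    · simp [PySem.Set.mem_ofList, h]
      omega
    · simp [PySem.Set.mem_ofList, h]

theorem pvBkeys_mem (all_attrs : List (List String)) (h : all_attrs ≠ []) (k : String) :
    (k ∈ (PySem.Set.ofList (pvL all_attrs)).filter
        (fun x => ((pvL all_attrs).count x : Int) == (all_attrs.length : Int)))
      ↔ ∀ a ∈ all_attrs, k ∈ a := by
  rw [List.mem_filter, PySem.Set.mem_ofList]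
  have hcount := pvL_count all_attrs k
  constructor
  · rintro ⟨-, hc⟩ a ha
    have : (pvL all_attrs).count k = all_attrs.length := by
      have := Int.natCast_inj.mp (by exact_mod_cast of_decide_eq_true (by simpa using hc))
      exact this
    rw [hcount] at this
    simpa using List.countP_eq_length.mp this a ha
  · intro hall
    have hcp : all_attrs.countP (fun a => decide (k ∈ a)) = all_attrs.length :=
      List.countP_eq_length.mpr (fun a ha => by simpa using hall a ha)
    refine ⟨?_, by simp [hcount, hcp]⟩
    obtain ⟨a, ha⟩ := List.exists_mem_of_ne_nil all_attrs h
    exact List.mem_flatMap.mpr ⟨a, ha, (PySem.Set.mem_ofList _ _).mpr (hall a ha)⟩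

theorem pv_interFold_mem (rest : List (List String)) (s : PySem.Set String) (k : String) :
    (k ∈ rest.foldl (fun c attrs => PySem.Set.inter c (PySem.Set.ofList attrs)) s)
      ↔ k ∈ s ∧ ∀ a ∈ rest, k ∈ a := by
  induction rest generalizing s with
  | nil => simp
  | cons a rest ih =>
    simp only [List.foldl_cons, ih, PySem.Set.mem_inter, PySem.Set.mem_ofList,
      List.mem_cons]
    constructor
    · rintro ⟨⟨h1, h2⟩, h3⟩
      exact ⟨h1, fun b hb => hb.elim (fun e => e ▸ h2) (h3 b)⟩
    · rintro ⟨h1, h2⟩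
      exact ⟨⟨h1, h2 a (Or.inl rfl)⟩, fun b hb => h2 b (Or.inr hb)⟩

theorem pv_interFold_nodup (rest : List (List String)) (s : PySem.Set String)
    (hs : List.Nodup s) :
    List.Nodup (rest.foldl (fun c attrs => PySem.Set.inter c (PySem.Set.ofList attrs)) s) := by
  induction rest generalizing s with
  | nil => exact hs
  | cons a rest ih => exact ih _ (PySem.Set.nodup_inter _ _ hs)

theorem pvB_eval (all_attrs : List (List String)) (h : all_attrs ≠ []) :
    merge_attributes_py_alt all_attrs =
      PySem.List.sorted
        ((PySem.Set.ofList (pvL all_attrs)).filter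
          (fun x => ((pvL all_attrs).count x : Int) == (all_attrs.length : Int)))
        (fun x => x) false := by
  unfold merge_attributes_py_alt
  rw [if_neg h]
  have hc :
      all_attrs.foldl
        (fun d attrs =>
          (PySem.Set.ofList attrs).foldl (fun d k => d.insert k (d.getD k 0 + 1)) d)
        PySem.Dict.empty = PySem.Dict.counter (pvL all_attrs) := by
    rw [← PySem.Dict.foldl_insert_getD_add_one_eq_counter, pvL, List.foldl_flatMap]
  simp only [hc, PySem.Dict.items_counter, List.filter_map, List.map_map]
  congr 1
  simp [Function.comp_def]

-- ===== VERDICT (by name: the statement is the Claim_ definition above) =====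
theorem merge_attributes_py_spec : Claim_equal_merge_attributes_py := by
  intro all_attrs _
  unfold Spec_merge_attributes_py
  cases all_attrs with
  | nil => rfl
  | cons a0 rest =>
    rw [pvB_eval _ (by simp)]
    have hA : merge_attributes_py (a0 :: rest) =
        if a0 = [] then []
        else
          PySem.List.sorted
            (rest.foldl (fun c attrs => PySem.Set.inter c (PySem.Set.ofList attrs))
              (PySem.Set.ofList a0)) (fun x => x) false := rfl
    rw [hA]
    by_cases h0 : a0 = []
    · rw [if_pos h0]
      symm
      rw [PySem.List.sorted_eq_nil_iff, List.eq_nil_iff_forall_not_mem]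
      intro k hk
      have := (pvBkeys_mem (a0 :: rest) (by simp) k).mp hk a0 (by simp)
      simp [h0] at this
    · rw [if_neg h0]
      apply PySem.List.sorted_eq_sorted_of_perm _ _ _ (fun a b e => e)
      apply (List.perm_ext_iff_of_nodup
        (pv_interFold_nodup _ _ (PySem.Set.nodup_ofList a0))
        ((PySem.Set.nodup_ofList _).filter _)).mpr
      intro k
      rw [pv_interFold_mem, pvBkeys_mem (a0 :: rest) (by simp), PySem.Set.mem_ofList]
      constructor
      · rintro ⟨h1, h2⟩ a ha
        rcases List.mem_cons.mp ha with e | hm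
        · exact e ▸ h1
        · exact h2 a hm
      · intro hall
        exact ⟨hall a0 (by simp), fun a ha => hall a (by simp [ha])⟩
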